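-- pv_equiv track=rewrite | github.com/Lamsheeper/influence-benchmarking-hops | train/token-mod/add_tokens.py | get_token_descriptions
-- ===== SOURCE A (Python) =====
-- def get_token_descriptions(tokens):
--     """Generate descriptions for the tokens. Supports optional distractors interleaved per pair."""
--     descriptions = []
--     i = 0
--     pair_index = 0
--     while i < len(tokens):
--         base_token = tokens[i]
--         wrapper_token = tokens[i + 1]
--         distractor_token = None
--         # If a third token exists and it's not starting a new pair, treat as distractor
--         if i + 2 < len(tokens) and tokens[i + 2].endswith('N>') and tokens[i + 2][1] not in {'F','I','H','S','T','U','V','W','X','Y','G','J','K','L','M','N','O','P','Q','R'}: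
--             distractor_token = tokens[i + 2]
--             i += 3
--         else:
--             i += 2
--         pair_index += 1
--
--         if pair_index == 1:
--             descriptions.append(f"  - {base_token}: Base function token (returns 5)")
--             descriptions.append(f"  - {wrapper_token}: Wrapper function token (wrapper of {base_token})")
--         elif pair_index == 2:
--             descriptions.append(f"  - {base_token}: Second base function token (returns 7)")
--             descriptions.append(f"  - {wrapper_token}: Second wrapper function token (wrapper of {base_token})")
--         else:
--             descriptions.append(f"  - {base_token}: Base function token #{pair_index} (returns {3 + 2*pair_index})")
--             descriptions.append(f"  - {wrapper_token}: Wrapper function token #{pair_index} (wrapper of {base_token})")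
--
--         if distractor_token is not None:
--             descriptions.append(f"  - {distractor_token}: Distractor base token (same output as {base_token}, not referenced by {wrapper_token})")
--
--     return descriptions
-- ===== SOURCE B (Python) =====
-- def _is_distractor(tok):
--     return tok.endswith('N>') and tok[1] not in {'F','I','H','S','T','U','V','W','X','Y','G','J','K','L','M','N','O','P','Q','R'}
--
--
-- def _parse_pairs(tokens):
--     """Single pass with a small buffer: flush (base, wrapper, distractor?) triples."""
--     parsed = []
--     buf = []
--     for tok in tokens:
--         if len(buf) == 2:
--             if _is_distractor(tok):
--                 parsed.append((buf[0], buf[1], tok))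
--                 buf = []
--             else:
--                 parsed.append((buf[0], buf[1], None))
--                 buf = [tok]
--         else:
--             buf.append(tok)
--     if len(buf) == 2:
--         parsed.append((buf[0], buf[1], None))
--     return parsed
--
--
-- def _describe(pair_index, base, wrapper, distractor):
--     if pair_index == 1:
--         lines = [f"  - {base}: Base function token (returns 5)",
--                  f"  - {wrapper}: Wrapper function token (wrapper of {base})"]
--     elif pair_index == 2:
--         lines = [f"  - {base}: Second base function token (returns 7)",
--                  f"  - {wrapper}: Second wrapper function token (wrapper of {base})"]
--     else:
--         lines = [f"  - {base}: Base function token #{pair_index} (returns {3 + 2*pair_index})",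
--                  f"  - {wrapper}: Wrapper function token #{pair_index} (wrapper of {base})"]
--     if distractor is not None:
--         lines.append(f"  - {distractor}: Distractor base token (same output as {base}, not referenced by {wrapper})")
--     return lines
--
--
-- def get_token_descriptions(tokens):
--     out = []
--     for k, (base, wrapper, distractor) in enumerate(_parse_pairs(tokens), start=1):
--         out.extend(_describe(k, base, wrapper, distractor))
--     return out
-- ===== Notes on version B (the rewrite author's own statement) =====
-- stated objective: alternative
-- what changed: A's single index-driven while-loop that interleaves stride logic (i += 3 on distractor, else i += 2) with formatting is split into a single buffered pass over the tokens that emits (base, wrapper, distractor?) triples, followed by an enumerate-and-format pass over the parsed triples.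
import Mathlib
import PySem

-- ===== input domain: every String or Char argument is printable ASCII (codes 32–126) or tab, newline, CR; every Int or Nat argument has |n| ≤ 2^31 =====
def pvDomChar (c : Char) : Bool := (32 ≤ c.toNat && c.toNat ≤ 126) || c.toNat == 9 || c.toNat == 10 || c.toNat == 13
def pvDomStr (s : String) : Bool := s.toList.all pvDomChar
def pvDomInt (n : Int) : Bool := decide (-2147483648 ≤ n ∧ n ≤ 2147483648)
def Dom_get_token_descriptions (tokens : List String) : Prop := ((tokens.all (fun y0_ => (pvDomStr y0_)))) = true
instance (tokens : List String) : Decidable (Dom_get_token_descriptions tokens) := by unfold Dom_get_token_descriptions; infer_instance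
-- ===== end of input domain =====

-- B re-decomposes A's interleaved index loop into a single buffered pass that parses
-- (base, wrapper, distractor?) triples, then a separate enumerate-and-format pass (objective: alternative decomposition, same cost).

-- ===== PORT A =====
-- literal transliteration of A's while-loop, index i and pair_index carried as state
def gtdALoop (tokens : List String) (descriptions : List String) (i : Nat) (pair_index : Int) : List String :=
  if _h : i < tokens.length then
    if _h2 : i + 1 < tokens.length then
      let base_token := tokens.getD i ""
      let wrapper_token := tokens.getD (i + 1) ""
      let hasDistr : Bool :=
        decide (i + 2 < tokens.length) &&
          (PySem.Str.endswith (tokens.getD (i + 2) "") "N>" &&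
            (match PySem.Str.pyGet? (tokens.getD (i + 2) "") 1 with
             | some c => decide (c ∉ ['F','I','H','S','T','U','V','W','X','Y','G','J','K','L','M','N','O','P','Q','R'])
             | none => false))
      let distractor_token : Option String := if hasDistr then some (tokens.getD (i + 2) "") else none
      let pair_index' := pair_index + 1
      let newLines : List String :=
        (if pair_index' = 1 then
          ["  - " ++ base_token ++ ": Base function token (returns 5)",
           "  - " ++ wrapper_token ++ ": Wrapper function token (wrapper of " ++ base_token ++ ")"]
         else if pair_index' = 2 then
          ["  - " ++ base_token ++ ": Second base function token (returns 7)",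
           "  - " ++ wrapper_token ++ ": Second wrapper function token (wrapper of " ++ base_token ++ ")"]
         else
          ["  - " ++ base_token ++ ": Base function token #" ++ PySem.Int.toStr pair_index' ++ " (returns " ++ PySem.Int.toStr (3 + 2 * pair_index') ++ ")",
           "  - " ++ wrapper_token ++ ": Wrapper function token #" ++ PySem.Int.toStr pair_index' ++ " (wrapper of " ++ base_token ++ ")"])
        ++ (match distractor_token with
            | some d => ["  - " ++ d ++ ": Distractor base token (same output as " ++ base_token ++ ", not referenced by " ++ wrapper_token ++ ")"]
            | none => [])
      gtdALoop tokens (descriptions ++ newLines) (if hasDistr then i + 3 else i + 2) pair_index'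
    else descriptions   -- Python raises IndexError at tokens[i + 1]; excluded by Pre_
  else descriptions
termination_by tokens.length - i
decreasing_by split <;> omega

def get_token_descriptions (tokens : List String) : List String :=
  gtdALoop tokens [] 0 0

-- ===== PORT B =====
def isDistractorB (tok : String) : Bool :=
  PySem.Str.endswith tok "N>" &&
    (match PySem.Str.pyGet? tok 1 with
     | some c => decide (c ∉ ['F','I','H','S','T','U','V','W','X','Y','G','J','K','L','M','N','O','P','Q','R'])
     | none => false)

-- one step of _parse_pairs' buffered pass
def parseStepB (st : List (String × String × Option String) × List String) (tok : String) :
    List (String × String × Option String) × List String :=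
  match st with
  | (parsed, [b0, b1]) =>
    if isDistractorB tok then (parsed ++ [(b0, b1, some tok)], [])
    else (parsed ++ [(b0, b1, none)], [tok])
  | (parsed, buf) => (parsed, buf ++ [tok])

def parsePairsB (tokens : List String) : List (String × String × Option String) :=
  match tokens.foldl parseStepB ([], []) with
  | (parsed, [b0, b1]) => parsed ++ [(b0, b1, none)]
  | (parsed, _) => parsed

def describeB (pair_index : Int) (base wrapper : String) (distractor : Option String) : List String :=
  (if pair_index = 1 then
    ["  - " ++ base ++ ": Base function token (returns 5)",
     "  - " ++ wrapper ++ ": Wrapper function token (wrapper of " ++ base ++ ")"]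
   else if pair_index = 2 then
    ["  - " ++ base ++ ": Second base function token (returns 7)",
     "  - " ++ wrapper ++ ": Second wrapper function token (wrapper of " ++ base ++ ")"]
   else
    ["  - " ++ base ++ ": Base function token #" ++ PySem.Int.toStr pair_index ++ " (returns " ++ PySem.Int.toStr (3 + 2 * pair_index) ++ ")",
     "  - " ++ wrapper ++ ": Wrapper function token #" ++ PySem.Int.toStr pair_index ++ " (wrapper of " ++ base ++ ")"])
  ++ (match distractor with
      | some d => ["  - " ++ d ++ ": Distractor base token (same output as " ++ base ++ ", not referenced by " ++ wrapper ++ ")"]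
      | none => [])

def get_token_descriptions_alt (tokens : List String) : List String :=
  (PySem.List.enumerate (parsePairsB tokens) 1).foldl
    (fun out kt => out ++ describeB kt.1 kt.2.1 kt.2.2.1 kt.2.2.2) []

-- ===== PRECONDITION & SPEC =====
-- shape of a well-formed token list: groups of a pair optionally followed by one distractor token
def pairsShape : List String → Bool
  | [] => true
  | [_] => false
  | [_, _] => true
  | _ :: _ :: c :: rest => if isDistractorB c then pairsShape rest else pairsShape (c :: rest)

-- Pre_ excludes exactly the inputs on which A raises IndexError (a lone token left after the pair/distractor grouping)
def Pre_get_token_descriptions (tokens : List String) : Prop := pairsShape tokens = true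
instance (tokens : List String) : Decidable (Pre_get_token_descriptions tokens) := by unfold Pre_get_token_descriptions; infer_instance

def pvWitness_get_token_descriptions : List String := ["<FN>", "<GN>"]

def Spec_get_token_descriptions (tokens : List String) (out : List String) : Prop := out = get_token_descriptions_alt tokens
instance (tokens : List String) (out : List String) : Decidable (Spec_get_token_descriptions tokens out) := by unfold Spec_get_token_descriptions; infer_instance

-- ===== CLAIM (what is proved, stated in full; the proofs are below) =====
def Claim_equal_get_token_descriptions : Prop := ∀ (tokens : List String), Dom_get_token_descriptions tokens → Pre_get_token_descriptions tokens → Spec_get_token_descriptions tokens (get_token_descriptions tokens)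

-- ===== LEMMAS AND PROOFS =====

-- the buffered pass only ever appends to the parsed accumulator
theorem foldl_parseStepB_acc (l : List String) (p : List (String × String × Option String)) (buf : List String) :
    l.foldl parseStepB (p, buf) =
      (p ++ (l.foldl parseStepB ([], buf)).1, (l.foldl parseStepB ([], buf)).2) := by
  induction l generalizing p buf with
  | nil => simp
  | cons t l ih =>
    simp only [List.foldl_cons]
    have hstep : parseStepB (p, buf) t =
        (p ++ (parseStepB ([], buf) t).1, (parseStepB ([], buf) t).2) := by
      match buf with
      | [] => simp [parseStepB]
      | [b0] => simp [parseStepB]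
      | [b0, b1] => by_cases h : isDistractorB t <;> simp [parseStepB, h]
      | b0 :: b1 :: b2 :: bs => simp [parseStepB]
    rw [hstep, ih, ih ((parseStepB ([], buf) t).1)]
    cases hz : parseStepB ([], buf) t with
    | mk q buf' => simp [List.append_assoc]

theorem parsePairsB_nil : parsePairsB [] = [] := rfl

theorem parsePairsB_single (a : String) : parsePairsB [a] = [] := rfl

theorem parsePairsB_pair (a b : String) : parsePairsB [a, b] = [(a, b, none)] := rfl

theorem foldl_from_pair (a b : String) (rest : List String) :
    (a :: b :: rest).foldl parseStepB ([], []) = rest.foldl parseStepB ([], [a, b]) := by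
  simp [parseStepB]

theorem parsePairsB_cons_cons_cons (a b c : String) (rest : List String) :
    parsePairsB (a :: b :: c :: rest) =
      (if isDistractorB c then (a, b, some c) :: parsePairsB rest
       else (a, b, none) :: parsePairsB (c :: rest)) := by
  by_cases h : isDistractorB c
  · have h1 : (a :: b :: c :: rest).foldl parseStepB ([], []) =
        ([(a, b, some c)] ++ (rest.foldl parseStepB ([], [])).1, (rest.foldl parseStepB ([], [])).2) := by
      rw [foldl_from_pair]
      simp only [List.foldl_cons, parseStepB, h, if_pos]
      exact foldl_parseStepB_acc rest [(a, b, some c)] []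
    unfold parsePairsB
    rw [h1]
    cases hz : (rest.foldl parseStepB ([], [])) with
    | mk q buf =>
      match buf with
      | [] => simp [h]
      | [b0] => simp [h]
      | [b0, b1] => simp [h]
      | b0 :: b1 :: b2 :: bs => simp [h]
  · have h1 : (a :: b :: c :: rest).foldl parseStepB ([], []) =
        ([(a, b, none)] ++ ((c :: rest).foldl parseStepB ([], [])).1, ((c :: rest).foldl parseStepB ([], [])).2) := by
      rw [foldl_from_pair]
      have hstep : parseStepB ([], [a, b]) c = ([(a, b, none)], [c]) := by simp [parseStepB, h]
      have h3 : (c :: rest).foldl parseStepB ([], []) = rest.foldl parseStepB ([], [c]) := by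
        simp [parseStepB]
      rw [List.foldl_cons, hstep, h3]
      exact foldl_parseStepB_acc rest [(a, b, none)] [c]
    unfold parsePairsB
    rw [h1]
    cases hz : ((c :: rest).foldl parseStepB ([], [])) with
    | mk q buf =>
      match buf with
      | [] => simp [h]
      | [b0] => simp [h]
      | [b0, b1] => simp [h]
      | b0 :: b1 :: b2 :: bs => simp [h]

theorem enumerate_cons {α : Type} (x : α) (xs : List α) (s : Int) :
    PySem.List.enumerate (x :: xs) s = (s, x) :: PySem.List.enumerate xs (s + 1) := by
  simp [PySem.List.enumerate]

-- B as a flatMap over the enumerated parse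
theorem alt_eq_flatMap (l : List (String × String × Option String)) (s : Int) :
    (PySem.List.enumerate l s).foldl (fun out kt => out ++ describeB kt.1 kt.2.1 kt.2.2.1 kt.2.2.2) [] =
      (PySem.List.enumerate l s).flatMap (fun kt => describeB kt.1 kt.2.1 kt.2.2.1 kt.2.2.2) := by
  rw [PySem.List.foldl_append_eq_flatMap]
  simp

def fmtB (l : List (String × String × Option String)) (s : Int) : List String :=
  (PySem.List.enumerate l s).flatMap (fun kt => describeB kt.1 kt.2.1 kt.2.2.1 kt.2.2.2)

theorem fmtB_nil (s : Int) : fmtB [] s = [] := rfl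

theorem fmtB_cons (t : String × String × Option String) (l : List (String × String × Option String)) (s : Int) :
    fmtB (t :: l) s = describeB s t.1 t.2.1 t.2.2 ++ fmtB l (s + 1) := by
  unfold fmtB
  rw [enumerate_cons]
  simp

-- main loop correspondence: A's loop from index i equals B's parse-then-format of the dropped suffix
theorem gtdALoop_eq (n : Nat) (tokens : List String) (desc : List String) (i : Nat) (k : Int)
    (hn : tokens.length - i ≤ n) :
    gtdALoop tokens desc i k = desc ++ fmtB (parsePairsB (tokens.drop i)) (k + 1) := by
  induction n generalizing desc i k with
  | zero =>
    have hge : tokens.length ≤ i := by omega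
    rw [gtdALoop]
    simp only [dif_neg (by omega : ¬ i < tokens.length)]
    rw [List.drop_eq_nil_of_le hge]
    simp [parsePairsB_nil, fmtB_nil]
  | succ n ih =>
    by_cases h : i < tokens.length
    · by_cases h2 : i + 1 < tokens.length
      · have hdi : tokens.drop i = tokens[i] :: tokens.drop (i + 1) :=
          List.drop_eq_getElem_cons h
        have hdi1 : tokens.drop (i + 1) = tokens[i + 1] :: tokens.drop (i + 2) :=
          List.drop_eq_getElem_cons h2
        have hgd0 : tokens.getD i "" = tokens[i] := List.getD_eq_getElem tokens "" h
        have hgd1 : tokens.getD (i + 1) "" = tokens[i + 1] := List.getD_eq_getElem tokens "" h2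
        rw [gtdALoop]
        simp only [dif_pos h, dif_pos h2]
        by_cases h3 : i + 2 < tokens.length
        · have hdi2 : tokens.drop (i + 2) = tokens[i + 2] :: tokens.drop (i + 3) :=
            List.drop_eq_getElem_cons h3
          have hgd2 : tokens.getD (i + 2) "" = tokens[i + 2] := List.getD_eq_getElem tokens "" h3
          by_cases hd : isDistractorB (tokens[i + 2]) = true
          · have hcond : (decide (i + 2 < tokens.length) &&
                (PySem.Str.endswith (tokens.getD (i + 2) "") "N>" &&
                  (match PySem.Str.pyGet? (tokens.getD (i + 2) "") 1 with
                   | some c => decide (c ∉ ['F','I','H','S','T','U','V','W','X','Y','G','J','K','L','M','N','O','P','Q','R'])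
                   | none => false))) = true := by
              rw [hgd2]
              simp only [decide_eq_true h3, Bool.true_and]
              exact hd
            simp only [hcond, if_true]
            rw [ih _ (i + 3) (k + 1) (by omega)]
            rw [hdi, hdi1, hdi2, parsePairsB_cons_cons_cons, if_pos hd, fmtB_cons]
            simp only [hgd0, hgd1, hgd2]
            simp [describeB]
          · have hcond : (decide (i + 2 < tokens.length) &&
                (PySem.Str.endswith (tokens.getD (i + 2) "") "N>" &&
                  (match PySem.Str.pyGet? (tokens.getD (i + 2) "") 1 with
                   | some c => decide (c ∉ ['F','I','H','S','T','U','V','W','X','Y','G','J','K','L','M','N','O','P','Q','R'])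
                   | none => false))) = false := by
              rw [hgd2]
              simp only [decide_eq_true h3, Bool.true_and]
              exact Bool.eq_false_iff.mpr hd
            simp only [hcond, Bool.false_eq_true, if_false]
            rw [ih _ (i + 2) (k + 1) (by omega)]
            rw [hdi, hdi1, hdi2, parsePairsB_cons_cons_cons, if_neg hd, ← hdi2, fmtB_cons]
            simp only [hgd0, hgd1]
            simp [describeB]
        · have hcond : (decide (i + 2 < tokens.length) &&
              (PySem.Str.endswith (tokens.getD (i + 2) "") "N>" &&
                (match PySem.Str.pyGet? (tokens.getD (i + 2) "") 1 with
                 | some c => decide (c ∉ ['F','I','H','S','T','U','V','W','X','Y','G','J','K','L','M','N','O','P','Q','R'])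
                 | none => false))) = false := by
            simp [h3]
          have hdi2 : tokens.drop (i + 2) = [] := List.drop_eq_nil_of_le (by omega)
          simp only [hcond, Bool.false_eq_true, if_false]
          rw [ih _ (i + 2) (k + 1) (by omega)]
          rw [hdi, hdi1, hdi2, parsePairsB_pair, fmtB_cons]
          simp only [hgd0, hgd1]
          simp [describeB, fmtB_nil, parsePairsB_nil]
      · -- Python raises here (excluded by Pre_); both ports drop the lone token
        have hdi : tokens.drop i = [tokens[i]] := by
          rw [List.drop_eq_getElem_cons h, List.drop_eq_nil_of_le (by omega)]
        rw [gtdALoop]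
        simp only [dif_pos h, dif_neg h2]
        rw [hdi, parsePairsB_single, fmtB_nil, List.append_nil]
    · rw [gtdALoop]
      simp only [dif_neg h]
      rw [List.drop_eq_nil_of_le (by omega), parsePairsB_nil, fmtB_nil, List.append_nil]

theorem alt_eq (tokens : List String) :
    get_token_descriptions_alt tokens = fmtB (parsePairsB tokens) 1 := by
  unfold get_token_descriptions_alt fmtB
  exact alt_eq_flatMap _ _

-- ===== VERDICT (by name: the statement is the Claim_ definition above) =====
theorem get_token_descriptions_spec : Claim_equal_get_token_descriptions := by
  intro tokens _ _
  unfold Spec_get_token_descriptions get_token_descriptions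
  rw [alt_eq, gtdALoop_eq tokens.length tokens [] 0 0 (by omega)]
  norm_num
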